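-- pv_equiv track=rewrite | github.com/ridhwaans/practice-vault | interviews/other/jobOffers.py | jobOffers
-- ===== SOURCE A (Python) =====
-- def jobOffers(scores, lowerLimits, upperLimits):
--     if len(lowerLimits) != len(upperLimits):
--         throws("Number of lower and upper limits not equal")
--     intervals = []
--     for i in range(len(lowerLimits)):
--         intervals.append([lowerLimits[i], upperLimits[i]])
--
--     result = []
--     for interval in intervals:
--         result.append(sum([(score >= interval[0]) & (score <= interval[1]) for score in scores]))
--
--     return result
-- ===== SOURCE B (Python) =====
-- def _bisect_left(a, x):
--     lo, hi = 0, len(a)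
--     while lo < hi:
--         mid = (lo + hi) // 2
--         if a[mid] < x:
--             lo = mid + 1
--         else:
--             hi = mid
--     return lo
--
--
-- def _bisect_right(a, x):
--     lo, hi = 0, len(a)
--     while lo < hi:
--         mid = (lo + hi) // 2
--         if x < a[mid]:
--             hi = mid
--         else:
--             lo = mid + 1
--     return lo
--
--
-- def jobOffers(scores, lowerLimits, upperLimits):
--     if len(lowerLimits) != len(upperLimits):
--         raise ValueError("Number of lower and upper limits not equal")
--     s = sorted(scores)
--     result = []
--     for lo, hi in zip(lowerLimits, upperLimits):
--         result.append(max(0, _bisect_right(s, hi) - _bisect_left(s, lo)))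
--     return result
-- ===== Notes on version B (the rewrite author's own statement) =====
-- stated objective: faster
-- what changed: Instead of scanning all scores for every query, B sorts the scores once and answers each query as bisect_right(upper) - bisect_left(lower) via hand-written binary searches (clamped at 0 for empty intervals).
import Mathlib
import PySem

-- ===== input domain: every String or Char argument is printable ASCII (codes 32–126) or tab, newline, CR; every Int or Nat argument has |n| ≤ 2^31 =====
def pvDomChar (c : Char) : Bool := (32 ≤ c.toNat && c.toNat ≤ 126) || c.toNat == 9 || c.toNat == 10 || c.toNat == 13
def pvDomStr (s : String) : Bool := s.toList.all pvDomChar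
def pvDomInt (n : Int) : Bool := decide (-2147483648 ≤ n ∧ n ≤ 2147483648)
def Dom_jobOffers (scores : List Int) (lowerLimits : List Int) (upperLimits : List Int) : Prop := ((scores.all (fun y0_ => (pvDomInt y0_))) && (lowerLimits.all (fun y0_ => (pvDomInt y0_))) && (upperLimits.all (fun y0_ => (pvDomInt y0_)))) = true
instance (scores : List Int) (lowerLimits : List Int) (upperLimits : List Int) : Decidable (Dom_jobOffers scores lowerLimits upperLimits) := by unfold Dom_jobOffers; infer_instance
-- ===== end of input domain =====

-- B sorts the scores once and answers each query by two binary searches instead of A's per-query scan over all scores.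


-- ===== PORT A =====
-- indexing lowerLimits[i] / upperLimits[i] / interval[0] / interval[1] is always in range
-- under Pre_ (equal lengths, i < length), so pyGetD is exact there
def jobOffers (scores : List Int) (lowerLimits : List Int) (upperLimits : List Int) : List Int :=
  let intervals : List (List Int) :=
    (PySem.List.pyRange 0 (lowerLimits.length : Int) 1).foldl
      (fun acc i => acc ++ [[PySem.List.pyGetD lowerLimits i 0, PySem.List.pyGetD upperLimits i 0]]) []
  intervals.foldl
    (fun res interval =>
      res ++ [(scores.map (fun score =>
        if (decide (score ≥ PySem.List.pyGetD interval 0 0) && decide (score ≤ PySem.List.pyGetD interval 1 0)) = true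
        then (1 : Int) else 0)).sum]) []

-- ===== PORT B =====
-- Source B's hand-written _bisect_left/_bisect_right are exactly the loops of
-- PySem.List.bisectLeft / bisectRight (same mid = (lo+hi)//2 and same branches)
def jobOffers_alt (scores : List Int) (lowerLimits : List Int) (upperLimits : List Int) : List Int :=
  let s := PySem.List.sorted scores (fun x => x) false
  (lowerLimits.zip upperLimits).foldl
    (fun result p =>
      result ++ [max 0 ((PySem.List.bisectRight s p.2 : Int) - (PySem.List.bisectLeft s p.1 : Int))]) []

-- ===== PRECONDITION & SPEC =====
-- Pre_ excludes inputs with unequal limit-list lengths, on which A raises NameError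
-- (it calls the undefined helper 'throws'); B raises ValueError there as well.
def Pre_jobOffers (scores : List Int) (lowerLimits : List Int) (upperLimits : List Int) : Prop :=
  lowerLimits.length = upperLimits.length
instance (scores : List Int) (lowerLimits : List Int) (upperLimits : List Int) : Decidable (Pre_jobOffers scores lowerLimits upperLimits) := by unfold Pre_jobOffers; infer_instance

def pvWitness_jobOffers : List Int × List Int × List Int := ([1, 5, 3], [2, 0], [4, 6])

def Spec_jobOffers (scores : List Int) (lowerLimits : List Int) (upperLimits : List Int) (out : List Int) : Prop := out = jobOffers_alt scores lowerLimits upperLimits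
instance (scores : List Int) (lowerLimits : List Int) (upperLimits : List Int) (out : List Int) : Decidable (Spec_jobOffers scores lowerLimits upperLimits out) := by unfold Spec_jobOffers; infer_instance

-- ===== CLAIM (what is proved, stated in full; the proofs are below) =====
def Claim_equal_jobOffers : Prop := ∀ (scores : List Int) (lowerLimits : List Int) (upperLimits : List Int), Dom_jobOffers scores lowerLimits upperLimits → Pre_jobOffers scores lowerLimits upperLimits → Spec_jobOffers scores lowerLimits upperLimits (jobOffers scores lowerLimits upperLimits)

-- ===== LEMMAS AND PROOFS =====

-- countP equals the split point t when p holds exactly on the first t positions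
theorem countP_of_split (s : List Int) (p : Int → Bool) (t : Nat) (ht : t ≤ s.length)
    (h1 : ∀ j (hj : j < s.length), j < t → p s[j] = true)
    (h2 : ∀ j (hj : j < s.length), t ≤ j → p s[j] = false) :
    s.countP p = t := by
  induction s generalizing t with
  | nil => simp at ht ⊢; omega
  | cons a tl ih =>
    cases t with
    | zero =>
      have ha : p a = false := h2 0 (by simp) (Nat.zero_le _)
      have htl : tl.countP p = 0 := by
        apply ih 0 (Nat.zero_le _)
        · intro j hj hj0; omega
        · intro j hj _
          have := h2 (j + 1) (by simpa using Nat.succ_lt_succ hj) (Nat.zero_le _)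
          simpa using this
      simp [ha, htl]
    | succ t' =>
      have ha : p a = true := h1 0 (by simp) (Nat.succ_pos _)
      have htl : tl.countP p = t' := by
        apply ih t' (by simpa using ht)
        · intro j hj hjt
          have := h1 (j + 1) (by simpa using Nat.succ_lt_succ hj) (Nat.succ_lt_succ hjt)
          simpa using this
        · intro j hj hjt
          have := h2 (j + 1) (by simpa using Nat.succ_lt_succ hj) (Nat.succ_le_succ hjt)
          simpa using this
      simp [ha, htl]

-- with lo ≤ hi, counting ≤ hi splits into counting < lo and counting the interval
theorem countP_interval_split (l : List Int) (lo hi : Int) (h : lo ≤ hi) :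
    l.countP (fun v => decide (v ≤ hi))
      = l.countP (fun v => decide (v < lo)) + l.countP (fun v => decide (lo ≤ v) && decide (v ≤ hi)) := by
  induction l with
  | nil => simp
  | cons a tl ih =>
    simp only [List.countP_cons, ih]
    by_cases h2 : a < lo
    · have h1 : a ≤ hi := by omega
      have h3 : ¬ lo ≤ a := by omega
      simp [h1, h2, h3]; omega
    · by_cases h1 : a ≤ hi
      · have h3 : lo ≤ a := by omega
        simp [h1, h2, h3]; omega
      · have h3 : lo ≤ a := by omega
        simp [h1, h2, h3]

-- bisectLeft on a sorted list counts the elements strictly below x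
theorem bisectLeft_eq_countP (s : List Int) (x : Int) (hs : s.Pairwise (· ≤ ·)) :
    PySem.List.bisectLeft s x = s.countP (fun v => decide (v < x)) := by
  obtain ⟨hle, hlt, hge⟩ := PySem.List.bisectLeft_spec s x hs
  refine (countP_of_split s _ _ hle ?_ ?_).symm
  · intro j hj hjt; simpa using hlt j hj hjt
  · intro j hj hjt; simpa using hge j hj hjt

-- bisectRight on a sorted list counts the elements ≤ x
theorem bisectRight_eq_countP (s : List Int) (x : Int) (hs : s.Pairwise (· ≤ ·)) :
    PySem.List.bisectRight s x = s.countP (fun v => decide (v ≤ x)) := by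
  obtain ⟨hle, hlt, hge⟩ := PySem.List.bisectRight_spec s x hs
  refine (countP_of_split s _ _ hle ?_ ?_).symm
  · intro j hj hjt; simpa using hlt j hj hjt
  · intro j hj hjt; simpa [not_le] using hge j hj hjt

-- core: clamped bisect difference on the sorted list counts the interval members
theorem bisect_count (scores : List Int) (lo hi : Int) :
    max 0 ((PySem.List.bisectRight (PySem.List.sorted scores (fun x => x) false) hi : Int)
      - (PySem.List.bisectLeft (PySem.List.sorted scores (fun x => x) false) lo : Int))
    = (scores.countP (fun v => decide (lo ≤ v) && decide (v ≤ hi)) : Int) := by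
  set s := PySem.List.sorted scores (fun x => x) false with hsdef
  have hs : s.Pairwise (· ≤ ·) := by
    simpa using PySem.List.sorted_pairwise scores (fun x => x)
  have hperm : s.Perm scores := PySem.List.sorted_perm scores (fun x => x) false
  rw [bisectLeft_eq_countP s lo hs, bisectRight_eq_countP s hi hs,
    ← hperm.countP_eq (fun v => decide (lo ≤ v) && decide (v ≤ hi))]
  by_cases h : lo ≤ hi
  · have := countP_interval_split s lo hi h
    omega
  · have h0 : s.countP (fun v => decide (lo ≤ v) && decide (v ≤ hi)) = 0 := by
      rw [List.countP_eq_zero]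
      intro a _; simp; intro h1; omega
    have hmono : s.countP (fun v => decide (v ≤ hi)) ≤ s.countP (fun v => decide (v < lo)) := by
      apply List.countP_mono_left
      intro a _ ha; simp at ha ⊢; omega
    omega

-- ===== VERDICT (by name: the statement is the Claim_ definition above) =====
theorem jobOffers_spec : Claim_equal_jobOffers := by
  intro scores lowerLimits upperLimits _ hpre
  unfold Pre_jobOffers at hpre
  unfold Spec_jobOffers jobOffers jobOffers_alt
  simp only [PySem.List.foldl_append_singleton_eq_map, List.nil_append, List.map_map]
  apply List.ext_getElem
  · simp [PySem.List.length_pyRange_one, hpre]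
  · intro k h1 h2
    simp only [List.getElem_map, Function.comp_apply, List.getElem_zip,
      PySem.List.getElem_pyRange_one, zero_add, PySem.List.pyGetD_natCast, bisect_count]
    have hk1 : k < lowerLimits.length := by
      simpa [PySem.List.length_pyRange_one] using h1
    have hk2 : k < upperLimits.length := hpre ▸ hk1
    rw [List.getD_eq_getElem _ _ hk1, List.getD_eq_getElem _ _ hk2]
    simp [PySem.List.pyGetD, ge_iff_le]
    rw [← PySem.List.sum_map_ite_one_zero
      (fun v => decide (lowerLimits[k] ≤ v) && decide (v ≤ upperLimits[k])) scores]
    simp
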